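-- pv_equiv track=rewrite | github.com/RuihaoQiu/Machine-learning-model-deployment | postprocess.py | get_all_skill_index
-- ===== SOURCE A (Python) =====
-- def get_all_bskill_index(labeled_tokens):
--     bskill_index = [
--         i
--         for i, (token, labels_pred) in enumerate(labeled_tokens)
--         if labels_pred == "B-SKILL"
--     ]
--     bskill_index.append(len(labeled_tokens))
--     return [
--         (bskill_index[i], bskill_index[i + 1]) for i in range(len(bskill_index) - 1)
--     ]
--
-- def get_all_skill_index(labeled_tokens):
--     idx_pairs = get_all_bskill_index(labeled_tokens)
--     skill_index_pairs = []
--     for m, n in idx_pairs: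
--         k = m + 1
--         for i in range(m, n):
--             if labeled_tokens[i][1] == "I-SKILL":
--                 k = i + 1
--         skill_index_pairs.append((m, k))
--     return skill_index_pairs
-- ===== SOURCE B (Python) =====
-- def get_all_skill_index(labeled_tokens):
--     res = []
--     m = None
--     k = None
--     for i, (token, label) in enumerate(labeled_tokens):
--         if label == "B-SKILL":
--             if m is not None:
--                 res.append((m, k))
--             m, k = i, i + 1
--         elif label == "I-SKILL":
--             if m is not None:
--                 k = i + 1
--     if m is not None:
--         res.append((m, k))
--     return res
-- ===== Notes on version B (the rewrite author's own statement) =====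
-- stated objective: simpler
-- what changed: Replaced A's two-phase build (B-SKILL index table, consecutive-segment pairs, then a nested rescan of each segment) by one left-to-right pass maintaining the currently open span (m,k) and flushing it on each new B-SKILL and at the end.
import Mathlib
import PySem

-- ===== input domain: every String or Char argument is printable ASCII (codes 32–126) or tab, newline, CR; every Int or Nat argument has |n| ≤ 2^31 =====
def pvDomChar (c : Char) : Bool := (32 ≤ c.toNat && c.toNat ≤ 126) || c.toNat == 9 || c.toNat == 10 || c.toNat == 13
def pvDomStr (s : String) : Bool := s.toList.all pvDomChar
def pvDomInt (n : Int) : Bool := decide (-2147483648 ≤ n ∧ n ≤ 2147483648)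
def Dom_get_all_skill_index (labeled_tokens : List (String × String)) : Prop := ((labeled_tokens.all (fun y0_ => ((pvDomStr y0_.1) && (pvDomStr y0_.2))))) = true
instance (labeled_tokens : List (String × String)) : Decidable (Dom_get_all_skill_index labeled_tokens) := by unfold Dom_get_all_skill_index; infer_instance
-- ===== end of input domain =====

-- B replaces A's two-phase build (B-index table + segment pairs + nested rescan of each segment)
-- by one left-to-right pass maintaining the currently open span; objective: simpler (same O(n) cost).

-- ===== PORT A =====
def get_all_bskill_index_port (labeled_tokens : List (String × String)) : List (Int × Int) :=
  let bskill_index : List Int :=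
    ((PySem.List.enumerate labeled_tokens 0).filter (fun p => p.2.2 == "B-SKILL")).map (fun p => p.1)
  let bskill_index := bskill_index ++ [(labeled_tokens.length : Int)]
  (PySem.List.pyRange 0 ((bskill_index.length : Int) - 1) 1).map
    (fun i => (PySem.List.pyGetD bskill_index i 0, PySem.List.pyGetD bskill_index (i + 1) 0))

def get_all_skill_index (labeled_tokens : List (String × String)) : List (Int × Int) :=
  (get_all_bskill_index_port labeled_tokens).foldl
    (fun skill_index_pairs p =>
      let k := (PySem.List.pyRange p.1 p.2 1).foldl
        (fun k i =>
          if (PySem.List.pyGetD labeled_tokens i ("", "")).2 == "I-SKILL" then i + 1 else k)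
        (p.1 + 1)
      skill_index_pairs ++ [(p.1, k)]) []

-- ===== PORT B =====
def get_all_skill_index_alt (labeled_tokens : List (String × String)) : List (Int × Int) :=
  let st := (PySem.List.enumerate labeled_tokens 0).foldl
    (fun (s : Option (Int × Int) × List (Int × Int)) p =>
      if p.2.2 == "B-SKILL" then
        (some (p.1, p.1 + 1), match s.1 with | none => s.2 | some mk => s.2 ++ [mk])
      else if p.2.2 == "I-SKILL" then
        (match s.1 with | none => none | some mk => some (mk.1, p.1 + 1), s.2)
      else s)
    (none, [])
  match st.1 with
  | none => st.2
  | some mk => st.2 ++ [mk]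

-- ===== PRECONDITION & SPEC =====
def Spec_get_all_skill_index (labeled_tokens : List (String × String)) (out : List (Int × Int)) : Prop :=
  out = get_all_skill_index_alt labeled_tokens
instance (labeled_tokens : List (String × String)) (out : List (Int × Int)) : Decidable (Spec_get_all_skill_index labeled_tokens out) := by
  unfold Spec_get_all_skill_index; infer_instance

-- ===== CLAIM =====
def Claim_equal_get_all_skill_index : Prop :=
  ∀ (labeled_tokens : List (String × String)), Dom_get_all_skill_index labeled_tokens →
    Spec_get_all_skill_index labeled_tokens (get_all_skill_index labeled_tokens)

-- ===== LEMMAS AND PROOFS =====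

/-- positions (as Ints) of the B-SKILL tokens, exactly A's `bskill_index` before the append. -/
def posB (l : List (String × String)) : List Int :=
  ((PySem.List.enumerate l 0).filter (fun p => p.2.2 == "B-SKILL")).map (fun p => p.1)

/-- A's inner loop: final `k` for the segment `[m, n)`. -/
def kfold (l : List (String × String)) (m n : Int) : Int :=
  (PySem.List.pyRange m n 1).foldl
    (fun k i => if (PySem.List.pyGetD l i ("", "")).2 == "I-SKILL" then i + 1 else k) (m + 1)

/-- consecutive pairs of a list. -/
def zipConsec : List Int → List (Int × Int)
  | [] => []
  | [_] => []
  | a :: b :: r => (a, b) :: zipConsec (b :: r)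

/-- A's value in segment normal form. -/
def AV (l : List (String × String)) : List (Int × Int) :=
  (zipConsec (posB l ++ [(l.length : Int)])).map (fun p => (p.1, kfold l p.1 p.2))

/-- B's fold state after the whole list. -/
def stFold (l : List (String × String)) : Option (Int × Int) × List (Int × Int) :=
  (PySem.List.enumerate l 0).foldl
    (fun (s : Option (Int × Int) × List (Int × Int)) p =>
      if p.2.2 == "B-SKILL" then
        (some (p.1, p.1 + 1), match s.1 with | none => s.2 | some mk => s.2 ++ [mk])
      else if p.2.2 == "I-SKILL" then
        (match s.1 with | none => none | some mk => some (mk.1, p.1 + 1), s.2)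
      else s)
    (none, [])

theorem pairsNat (b : List Int) :
    (List.range (b.length - 1)).map (fun k => (b.getD k 0, b.getD (k + 1) 0)) = zipConsec b := by
  induction b with
  | nil => simp [zipConsec]
  | cons x r ih =>
    cases r with
    | nil => simp [zipConsec]
    | cons y s =>
      have hlen : (x :: y :: s : List Int).length - 1 = s.length + 1 := rfl
      rw [hlen, List.range_succ_eq_map]
      have hlen2 : (y :: s : List Int).length - 1 = s.length := rfl
      rw [hlen2] at ih
      simp only [List.map_cons, List.map_map, zipConsec]
      rw [← ih]
      refine List.cons_eq_cons.mpr ⟨by simp, List.map_congr_left (fun k _ => by simp)⟩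

theorem pairs_eq_zipConsec (b : List Int) :
    (PySem.List.pyRange 0 ((b.length : Int) - 1) 1).map
      (fun i => (PySem.List.pyGetD b i 0, PySem.List.pyGetD b (i + 1) 0)) = zipConsec b := by
  rw [PySem.List.pyRange_one, List.map_map, ← pairsNat b]
  have ht : ((b.length : Int) - 1 - 0).toNat = b.length - 1 := by omega
  rw [ht]
  refine List.map_congr_left (fun k _ => ?_)
  have h1 : (0 : Int) + (k : Int) = ((k : Nat) : Int) := by omega
  have h2 : (k : Int) + 1 = (((k + 1 : Nat)) : Int) := by push_cast; ring
  simp only [Function.comp, h1, h2, PySem.List.pyGetD_natCast]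

theorem bskill_port_eq (l : List (String × String)) :
    get_all_bskill_index_port l = zipConsec (posB l ++ [(l.length : Int)]) :=
  pairs_eq_zipConsec (posB l ++ [(l.length : Int)])

theorem A_eq_AV (l : List (String × String)) : get_all_skill_index l = AV l := by
  show List.foldl (fun acc p => acc ++ [(p.1, kfold l p.1 p.2)]) []
      (get_all_bskill_index_port l) = AV l
  exact (PySem.List.foldl_append_singleton_eq_map
      (fun p : Int × Int => (p.1, kfold l p.1 p.2)) (get_all_bskill_index_port l) []).trans
    (by rw [bskill_port_eq]; simp [AV])

theorem B_eq_flush (l : List (String × String)) :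
    get_all_skill_index_alt l =
      (match (stFold l).1 with | none => (stFold l).2 | some mk => (stFold l).2 ++ [mk]) := by
  rfl

def SkillInv (l : List (String × String)) : Prop :=
  match stFold l with
  | (none, acc) => posB l = [] ∧ acc = []
  | (some (m, k), acc) =>
      posB l ≠ [] ∧ (posB l).getLast? = some m ∧ 0 ≤ m ∧ m < (l.length : Int) ∧
      k = kfold l m (l.length : Int) ∧ AV l = acc ++ [(m, k)]

theorem posB_snoc (l : List (String × String)) (x : String × String) :
    posB (l ++ [x]) = posB l ++ (if x.2 == "B-SKILL" then [(l.length : Int)] else []) := by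
  unfold posB
  rw [PySem.List.enumerate_append, List.filter_append, List.map_append]
  by_cases h : (x.2 == "B-SKILL") = true <;>
    simp [PySem.List.enumerate_cons, PySem.List.enumerate_nil, h]

theorem posB_bound {l : List (String × String)} {m : Int} (h : m ∈ posB l) :
    0 ≤ m ∧ m < (l.length : Int) := by
  unfold posB at h
  simp only [List.mem_map, List.mem_filter] at h
  obtain ⟨p, ⟨hp, _⟩, rfl⟩ := h
  rw [PySem.List.mem_enumerate_iff] at hp
  obtain ⟨k, hk, rfl⟩ := hp
  simp
  omega

theorem zipConsec_mem : ∀ {b : List Int} {p : Int × Int}, p ∈ zipConsec b → p.1 ∈ b ∧ p.2 ∈ b := by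
  intro b
  induction b with
  | nil => intro p h; simp [zipConsec] at h
  | cons a r ih =>
    cases r with
    | nil => intro p h; simp [zipConsec] at h
    | cons c s =>
      intro p h
      rw [zipConsec] at h
      rcases List.mem_cons.mp h with h1 | h2
      · subst h1
        exact ⟨List.mem_cons_self, List.mem_cons_of_mem _ List.mem_cons_self⟩
      · have := ih h2
        exact ⟨List.mem_cons_of_mem _ this.1, List.mem_cons_of_mem _ this.2⟩

theorem zipConsec_snoc : ∀ (b : List Int) (g : Int), b.getLast? = some g →
    ∀ c, zipConsec (b ++ [c]) = zipConsec b ++ [(g, c)] := by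
  intro b
  induction b with
  | nil => intro g h; simp at h
  | cons a r ih =>
    intro g h c
    cases r with
    | nil =>
      simp at h
      subst h
      simp [zipConsec]
    | cons d s =>
      have h' : (d :: s : List Int).getLast? = some g := by
        rwa [List.getLast?_cons_cons] at h
      have hih := ih g h' c
      simp only [List.cons_append, zipConsec]
      rw [show (d :: (s ++ [c])) = (d :: s) ++ [c] by simp, hih]

theorem kfold_stable (l : List (String × String)) (x : String × String) {m n : Int}
    (hm : 0 ≤ m) (hn : n ≤ (l.length : Int)) : kfold (l ++ [x]) m n = kfold l m n := by
  unfold kfold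
  refine PySem.List.foldl_congr_mem _ _ _ _ ?_
  intro acc i hi
  rw [PySem.List.mem_pyRange_one] at hi
  have h0 : 0 ≤ i := le_trans hm hi.1
  have h1 : i < (l.length : Int) := lt_of_lt_of_le hi.2 hn
  rw [PySem.List.pyGetD_eq_getElem _ _ h0 (by simp; omega),
    PySem.List.pyGetD_eq_getElem _ _ h0 h1]
  have he : (l ++ [x])[i.toNat]'(by simp; omega) = l[i.toNat]'(by omega) :=
    List.getElem_append_left (by omega)
  rw [he]

theorem kfold_ext (l : List (String × String)) (x : String × String) {m : Int}
    (hm0 : 0 ≤ m) (hm : m ≤ (l.length : Int)) :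
    kfold (l ++ [x]) m ((l.length : Int) + 1)
      = if x.2 == "I-SKILL" then (l.length : Int) + 1 else kfold l m (l.length : Int) := by
  unfold kfold
  rw [PySem.List.pyRange_one_succ_right hm, List.foldl_append]
  simp only [List.foldl_cons, List.foldl_nil]
  have he : PySem.List.pyGetD (l ++ [x]) ((l.length : Int)) ("", "") = x := by
    rw [show ((l.length : Int)) = (((l.length : Nat) : Int)) from rfl, PySem.List.pyGetD_natCast]
    simp [List.getD]
  rw [he]
  have hs := kfold_stable l x hm0 (le_refl (l.length : Int))
  unfold kfold at hs
  rw [hs]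

theorem map_kfold_stable (l : List (String × String)) (x : String × String) (b : List Int)
    (hb : ∀ i ∈ b, 0 ≤ i ∧ i ≤ (l.length : Int)) :
    (zipConsec b).map (fun p => (p.1, kfold (l ++ [x]) p.1 p.2))
      = (zipConsec b).map (fun p => (p.1, kfold l p.1 p.2)) := by
  refine List.map_congr_left (fun p hp => ?_)
  obtain ⟨h1, h2⟩ := zipConsec_mem hp
  rw [kfold_stable l x (hb _ h1).1 (hb _ h2).2]

theorem AV_nil {l : List (String × String)} (h : posB l = []) : AV l = [] := by
  simp [AV, h, zipConsec]

theorem AV_last (l : List (String × String)) {g : Int} (hg : (posB l).getLast? = some g) :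
    AV l = (zipConsec (posB l)).map (fun p => (p.1, kfold l p.1 p.2))
      ++ [(g, kfold l g (l.length : Int))] := by
  unfold AV
  rw [zipConsec_snoc _ _ hg, List.map_append]
  rfl

theorem stFold_snoc (l : List (String × String)) (x : String × String) :
    stFold (l ++ [x]) =
      (if x.2 == "B-SKILL" then
        (some ((l.length : Int), (l.length : Int) + 1),
          match (stFold l).1 with | none => (stFold l).2 | some mk => (stFold l).2 ++ [mk])
      else if x.2 == "I-SKILL" then
        (match (stFold l).1 with | none => none | some mk => some (mk.1, (l.length : Int) + 1),
          (stFold l).2)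
      else stFold l) := by
  unfold stFold
  rw [PySem.List.enumerate_append, List.foldl_append]
  simp [PySem.List.enumerate_cons, PySem.List.enumerate_nil]

theorem inv_holds (l : List (String × String)) : SkillInv l := by
  induction l using List.reverseRecOn with
  | nil =>
    unfold SkillInv stFold posB
    simp [PySem.List.enumerate_nil]
  | append_singleton l x ih =>
    unfold SkillInv
    rw [stFold_snoc]
    unfold SkillInv at ih
    rcases hst : stFold l with ⟨st, acc⟩
    rw [hst] at ih
    have hlen' : ((l ++ [x]).length : Int) = (l.length : Int) + 1 := by simp
    have hL0 : (0 : Int) ≤ (l.length : Int) := Int.natCast_nonneg _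
    by_cases hB : (x.2 == "B-SKILL") = true
    · -- new B-SKILL token: flush and open a fresh span
      have hxI : (x.2 == "I-SKILL") = false := by
        have : x.2 = "B-SKILL" := by exact eq_of_beq hB
        rw [this]; rfl
      have hpos : posB (l ++ [x]) = posB l ++ [(l.length : Int)] := by
        rw [posB_snoc, if_pos hB]
      have hkL : kfold (l ++ [x]) (l.length : Int) ((l.length : Int) + 1)
          = (l.length : Int) + 1 := by
        rw [kfold_ext l x hL0 (le_refl _), hxI]
        simp [kfold, PySem.List.pyRange_one_eq_nil]
      have hAV : AV (l ++ [x]) = AV l ++ [((l.length : Int), (l.length : Int) + 1)] := by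
        unfold AV
        rw [hpos, hlen']
        rw [show posB l ++ [(l.length : Int)] ++ [(l.length : Int) + 1]
            = (posB l ++ [(l.length : Int)]) ++ [(l.length : Int) + 1] from rfl]
        rw [zipConsec_snoc _ _ List.getLast?_concat, List.map_append]
        rw [map_kfold_stable l x _ (fun i hi => by
          rcases List.mem_append.mp hi with h | h
          · have := posB_bound h; omega
          · simp at h; omega)]
        rw [List.map_singleton, hkL]
      rw [if_pos hB]
      cases st with
      | none =>
        obtain ⟨hpb, hacc⟩ := ih
        refine ⟨by simp [hpos], by simp [hpos], hL0, by omega, ?_, ?_⟩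
        · rw [hlen', hkL]
        · rw [hAV, AV_nil hpb, hacc]
      | some mk =>
        obtain ⟨m, k⟩ := mk
        obtain ⟨h1, h2, h3, h4, h5, h6⟩ := ih
        refine ⟨by simp [hpos], by simp [hpos], hL0, by omega, ?_, ?_⟩
        · rw [hlen', hkL]
        · rw [hAV, h6]
    · -- not a B-SKILL token: span starts unchanged
      have hpos : posB (l ++ [x]) = posB l := by
        rw [posB_snoc, if_neg hB]; simp
      rw [if_neg hB]
      cases st with
      | none =>
        obtain ⟨hpb, hacc⟩ := ih
        by_cases hI : (x.2 == "I-SKILL") = true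
        · rw [if_pos hI]
          exact ⟨by rw [hpos]; exact hpb, hacc⟩
        · rw [if_neg hI]
          exact ⟨by rw [hpos]; exact hpb, hacc⟩
      | some mk =>
        obtain ⟨m, k⟩ := mk
        obtain ⟨h1, h2, h3, h4, h5, h6⟩ := ih
        have hpre : (zipConsec (posB l)).map (fun p => (p.1, kfold l p.1 p.2)) = acc := by
          have hAVl := AV_last l h2
          rw [h6, ← h5] at hAVl
          exact List.append_cancel_right hAVl.symm
        have hkm : kfold (l ++ [x]) m ((l.length : Int) + 1)
            = if x.2 == "I-SKILL" then (l.length : Int) + 1 else k := by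
          rw [kfold_ext l x h3 (le_of_lt h4), h5]
        have hAV' : AV (l ++ [x])
            = acc ++ [(m, kfold (l ++ [x]) m ((l.length : Int) + 1))] := by
          unfold AV
          rw [hpos, hlen', zipConsec_snoc _ _ h2, List.map_append]
          rw [map_kfold_stable l x _ (fun i hi => by have := posB_bound hi; omega)]
          rw [hpre, List.map_singleton]
        by_cases hI : (x.2 == "I-SKILL") = true
        · rw [if_pos hI]
          refine ⟨by rw [hpos]; exact h1, by rw [hpos]; exact h2, h3, by omega, ?_, ?_⟩
          · rw [hlen', hkm, if_pos hI]
          · rw [hAV', hkm, if_pos hI]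
        · rw [if_neg hI]
          refine ⟨by rw [hpos]; exact h1, by rw [hpos]; exact h2, h3, by omega, ?_, ?_⟩
          · rw [hlen', hkm, if_neg hI, h5]
          · rw [hAV', hkm, if_neg hI]


-- ===== VERDICT =====
theorem get_all_skill_index_spec : Claim_equal_get_all_skill_index := by
  intro l _
  unfold Spec_get_all_skill_index
  rw [A_eq_AV, B_eq_flush]
  have h := inv_holds l
  unfold SkillInv at h
  rcases hst : stFold l with ⟨st, acc⟩
  rw [hst] at h
  match st with
  | none =>
      obtain ⟨h1, h2⟩ := h
      simp [AV, h1, h2, zipConsec]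
  | some (m, k) =>
      obtain ⟨_, _, _, _, _, h6⟩ := h
      simpa using h6
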